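-- pv_equiv track=rewrite | github.com/clarkyang37th/HackNYU-Themis | hack_nyu_tf_idf_and_cos_sim.py | abstracts_occurence
-- ===== SOURCE A (Python) =====
-- def abstracts_occurence(abstract_tokens):
--     total_docs = len(abstract_tokens)
--     dic = {}
--     count = 0
--     for doc in abstract_tokens:
--         for sentence in doc:
--             for tok in sentence:
--                 if tok not in dic:
--                     dic[tok] = [0]*total_docs
--                     dic[tok][count] = 1
--                 else:
--                     dic[tok][count] = dic[tok][count] + 1
--         count = count +1
--
--     return dic
-- ===== SOURCE B (Python) =====
-- def abstracts_occurence(abstract_tokens):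
--     total_docs = len(abstract_tokens)
--     dic = {}
--     for i, doc in enumerate(abstract_tokens):
--         counts = {}
--         for sentence in doc:
--             for tok in sentence:
--                 counts[tok] = counts.get(tok, 0) + 1
--         for tok, c in counts.items():
--             if tok not in dic:
--                 dic[tok] = [0] * total_docs
--             dic[tok][i] = c
--     return dic
-- ===== Notes on version B (the rewrite author's own statement) =====
-- stated objective: simpler
-- what changed: B replaces A's token-by-token cell increments into the growing dense-list dict by a per-document tally-then-assemble decomposition: it first counts each document's tokens in a local dict, then writes each distinct token's count into cell i once.
import Mathlib
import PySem

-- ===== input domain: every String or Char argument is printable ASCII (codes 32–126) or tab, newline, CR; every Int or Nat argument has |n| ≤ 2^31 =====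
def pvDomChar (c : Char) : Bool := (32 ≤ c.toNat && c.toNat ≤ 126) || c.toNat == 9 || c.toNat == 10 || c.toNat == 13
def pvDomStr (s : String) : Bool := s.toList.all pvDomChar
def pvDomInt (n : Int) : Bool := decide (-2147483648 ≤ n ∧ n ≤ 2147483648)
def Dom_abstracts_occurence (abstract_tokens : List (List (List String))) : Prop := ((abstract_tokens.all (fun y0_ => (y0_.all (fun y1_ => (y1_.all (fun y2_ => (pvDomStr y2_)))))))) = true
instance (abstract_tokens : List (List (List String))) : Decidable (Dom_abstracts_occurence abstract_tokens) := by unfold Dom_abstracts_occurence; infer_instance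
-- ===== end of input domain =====

-- B replaces A's token-by-token increments into the dense-list dict by a per-document
-- tally-then-assemble decomposition (count each document's tokens first, then write each
-- distinct token's count into cell i once); objective: simpler.


abbrev PvD := PySem.Dict String (List Int)

-- ===== PORT A =====
-- one token step of A's inner loop: `if tok not in dic: dic[tok] = [0]*total; dic[tok][count] = 1
-- else: dic[tok][count] += 1` (the list-cell read `dic[tok][count]` is `getD count 0`; exact, the
-- index is always in range since every stored list has length total and count < total)
def pvStepA (total count : Nat) (d : PvD) (tok : String) : PvD :=
  match d.get? tok with
  | none => d.insert tok ((List.replicate total (0 : Int)).set count 1)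
  | some lst => d.insert tok (lst.set count (lst.getD count 0 + 1))

-- one document of A's outer loop, threading (dic, count)
def pvDocA (total : Nat) (st : PvD × Nat) (doc : List (List String)) : PvD × Nat :=
  (doc.foldl (fun d sentence => sentence.foldl (pvStepA total st.2) d) st.1, st.2 + 1)

def abstracts_occurence (abstract_tokens : List (List (List String))) : List (String × List Int) :=
  let total := abstract_tokens.length
  (abstract_tokens.foldl (pvDocA total) (PySem.Dict.empty, 0)).1.items

-- ===== PORT B =====
-- B's per-document tally: counts[tok] = counts.get(tok, 0) + 1 over all sentences
def pvCounts (doc : List (List String)) : PySem.Dict String Int :=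
  doc.foldl (fun c sentence => sentence.foldl (fun c tok => c.insert tok (c.getD tok 0 + 1)) c)
    PySem.Dict.empty

-- B's assemble step: `if tok not in dic: dic[tok] = [0]*total; dic[tok][i] = c`
def pvAssignB (total i : Nat) (dic : PvD) (q : String × Int) : PvD :=
  let dic' := if dic.contains q.1 then dic else dic.insert q.1 (List.replicate total (0 : Int))
  dic'.insert q.1 ((dic'.getD q.1 []).set i q.2)

def pvDocB (total : Nat) (dic : PvD) (p : Int × List (List String)) : PvD :=
  (pvCounts p.2).items.foldl (pvAssignB total p.1.toNat) dic

def abstracts_occurence_alt (abstract_tokens : List (List (List String))) : List (String × List Int) :=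
  let total := abstract_tokens.length
  ((PySem.List.enumerate abstract_tokens 0).foldl (pvDocB total) PySem.Dict.empty).items

-- ===== PRECONDITION & SPEC =====
def Spec_abstracts_occurence (abstract_tokens : List (List (List String))) (out : List (String × List Int)) : Prop := out = abstracts_occurence_alt abstract_tokens
instance (abstract_tokens : List (List (List String))) (out : List (String × List Int)) : Decidable (Spec_abstracts_occurence abstract_tokens out) := by unfold Spec_abstracts_occurence; infer_instance

-- ===== CLAIM (what is proved, stated in full; the proofs are below) =====
def Claim_equal_abstracts_occurence : Prop := ∀ (abstract_tokens : List (List (List String))), Dom_abstracts_occurence abstract_tokens → Spec_abstracts_occurence abstract_tokens (abstracts_occurence abstract_tokens)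

-- ===== LEMMAS AND PROOFS =====

-- list-cell helpers
theorem pv_set_getD_self (l : List Int) (i : Nat) : l.set i (l.getD i 0) = l := by
  rcases lt_or_ge i l.length with h | h
  · rw [List.getD_eq_getElem _ _ h, List.set_getElem_self]
  · exact List.set_eq_of_length_le h

theorem pv_getD_set_ne (l : List Int) (i j : Nat) (x : Int) (h : j ≠ i) :
    (l.set i x).getD j 0 = l.getD j 0 := by
  rcases lt_or_ge j l.length with hj | hj
  · rw [List.getD_eq_getElem _ _ (by simpa), List.getD_eq_getElem _ _ hj,
      List.getElem_set_ne (by omega)]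
  · rw [List.getD_eq_default _ _ (by simpa), List.getD_eq_default _ _ hj]

theorem pv_getD_replicate (n i : Nat) : (List.replicate n (0 : Int)).getD i 0 = 0 := by
  rcases lt_or_ge i n with h | h
  · rw [List.getD_eq_getElem _ _ (by simpa), List.getElem_replicate]
  · rw [List.getD_eq_default _ _ (by simpa)]

theorem pv_set_set_getD (l : List Int) (i : Nat) (x c : Int) :
    (l.set i x).set i ((l.set i x).getD i 0 + c) = l.set i (x + c) := by
  rcases lt_or_ge i l.length with h | h
  · rw [List.getD_eq_getElem _ _ (by simpa), List.getElem_set_self (by simpa), List.set_set]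
  · rw [List.set_eq_of_length_le h, List.set_eq_of_length_le h, List.set_eq_of_length_le h]

-- step normal forms
theorem pvStepA_eq (total i : Nat) (d : PvD) (tok : String) :
    pvStepA total i d tok =
      d.insert tok ((d.getD tok (List.replicate total 0)).set i
        ((d.getD tok (List.replicate total 0)).getD i 0 + 1)) := by
  unfold pvStepA
  cases h : d.get? tok with
  | none => simp [PySem.Dict.getD_eq_get?_getD, h]
  | some lst => simp [PySem.Dict.getD_eq_get?_getD, h]

theorem pvAssignB_eq (total i : Nat) (dic : PvD) (q : String × Int) :
    pvAssignB total i dic q =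
      dic.insert q.1 ((dic.getD q.1 (List.replicate total 0)).set i q.2) := by
  unfold pvAssignB
  cases h : dic.contains q.1 with
  | true =>
    rw [PySem.Dict.contains_eq_isSome_get?, Option.isSome_iff_exists] at h
    obtain ⟨v, hv⟩ := h
    simp [hv, PySem.Dict.getD_eq_get?_getD]
  | false =>
    simp only [Bool.false_eq_true, if_false]
    rw [PySem.Dict.getD_insert_self, PySem.Dict.getD_of_not_contains dic _ h,
      PySem.Dict.insert_insert_self]

-- the abstract shapes the two folds produce
def pvF (i : Nat) (ts : List String) (p : String × List Int) : String × List Int :=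
  (p.1, p.2.set i (p.2.getD i 0 + (ts.count p.1 : Int)))

def pvFresh (ts : List String) (dic : PvD) : List String :=
  (PySem.Set.ofList ts).filter (fun t => !(dic.contains t))

def pvNew (total i : Nat) (ts : List String) (t : String) : String × List Int :=
  (t, (List.replicate total (0 : Int)).set i (ts.count t : Int))

-- Set.ofList plumbing
theorem pv_foldl_add (l : List String) : ∀ (s : PySem.Set String),
    l.foldl PySem.Set.add s = s ++ (PySem.Set.ofList l).filter (fun a => !(decide (a ∈ s))) := by
  induction l with
  | nil => intro s; simp [PySem.Set.ofList_eq_foldl]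
  | cons a l ih =>
    intro s
    have hof : PySem.Set.ofList (a :: l) = [a] ++ (PySem.Set.ofList l).filter (fun x => !(decide (x ∈ ([a] : List String)))) := by
      rw [PySem.Set.ofList_eq_foldl, List.foldl_cons, show PySem.Set.add [] a = [a] by
        rw [PySem.Set.add_eq_ite]; simp, ← ih [a]]
    rw [List.foldl_cons, ih, hof, PySem.Set.add_eq_ite]
    by_cases ha : a ∈ s
    · simp only [if_pos ha, List.filter_append, List.filter_filter]
      have h1 : (List.filter (fun a => !decide (a ∈ s)) [a]) = [] := by simp [ha]
      rw [h1, List.nil_append]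
      congr 1
      apply List.filter_congr
      intro x hx
      by_cases hxa : x = a <;> simp [hxa, ha]
    · simp only [if_neg ha, List.filter_append, List.filter_filter]
      have h1 : (List.filter (fun a => !decide (a ∈ s)) [a]) = [a] := by simp [ha]
      rw [h1, List.append_assoc]
      congr 2
      apply List.filter_congr
      intro x hx
      by_cases hxa : x = a
      · subst hxa
        have : x ∈ s ++ [x] := by simp
        simp [this]
      · have : (x ∈ s ++ [a]) ↔ x ∈ s := by simp [hxa]
        simp [hxa, this]

theorem pv_ofList_cons (a : String) (l : List String) :
    PySem.Set.ofList (a :: l) = a :: (PySem.Set.ofList l).filter (fun x => !(x == a)) := by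
  rw [PySem.Set.ofList_eq_foldl, List.foldl_cons, show PySem.Set.add [] a = [a] by
      rw [PySem.Set.add_eq_ite]; simp, pv_foldl_add]
  simp only [List.singleton_append, List.cons.injEq, true_and]
  apply List.filter_congr
  intro x hx
  simp only [List.mem_singleton]
  cases h : x == a
  · simp [ne_of_beq_false h]
  · simp [eq_of_beq h]

-- characterisation of A's inner (per-document) fold
theorem pvA_items (total i : Nat) (ts : List String) (dic : PvD) (hd : dic.keys.Nodup) :
    (ts.foldl (pvStepA total i) dic).items =
      dic.items.map (pvF i ts) ++ (pvFresh ts dic).map (pvNew total i ts) := by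
  induction ts generalizing dic with
  | nil =>
    have h1 : ∀ p ∈ dic.items, pvF i [] p = id p := by
      intro p _
      simp only [pvF, List.count_nil, Nat.cast_zero, add_zero, pv_set_getD_self, id]
    rw [List.foldl_nil, List.map_congr_left h1, List.map_id]
    simp [pvFresh, PySem.Set.ofList_eq_foldl]
  | cons t ts ih =>
    rw [List.foldl_cons, pvStepA_eq]
    set v := dic.getD t (List.replicate total 0) with hv
    rw [ih _ (PySem.Dict.nodup_keys_insert _ _ _ hd)]
    have hfr : ∀ b, dic.contains t = b →
        pvFresh ts (dic.insert t (v.set i (v.getD i 0 + 1))) =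
          (PySem.Set.ofList ts).filter (fun x => !(dic.contains x) && !(x == t)) := by
      intro b _
      unfold pvFresh
      apply List.filter_congr
      intro x _
      rw [PySem.Dict.contains_insert, Bool.not_or, Bool.and_comm]
    cases hc : dic.contains t with
    | true =>
      rw [PySem.Dict.items_insert_of_contains _ _ hc, List.map_map]
      congr 1
      · apply List.map_congr_left
        intro p hp
        simp only [Function.comp_apply]
        by_cases hpt : p.1 = t
        · rw [if_pos (by simp [hpt])]
          have hmem : (p.1, p.2) ∈ dic.items := by simpa using hp
          have hv2 : v = p.2 := by
            rw [hv]; exact PySem.Dict.getD_of_mem_items dic (hpt ▸ hmem) hd _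
          simp only [pvF, hv2]
          rw [pv_set_set_getD, hpt, Prod.mk.injEq]
          refine ⟨rfl, ?_⟩
          congr 1
          rw [List.count_cons_self]
          push_cast
          ring
        · rw [if_neg (by simp [hpt])]
          simp [pvF, Ne.symm hpt]
      · rw [hfr _ hc]
        have hfr2 : pvFresh (t :: ts) dic =
            (PySem.Set.ofList ts).filter (fun x => !(dic.contains x) && !(x == t)) := by
          unfold pvFresh
          rw [pv_ofList_cons, List.filter_cons, List.filter_filter]
          simp [hc]
        rw [hfr2]
        apply List.map_congr_left
        intro x hx
        have hxt : x ≠ t := by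
          have := List.of_mem_filter hx
          simp at this
          exact this.2
        simp [pvNew, Ne.symm hxt]
    | false =>
      rw [PySem.Dict.items_insert_of_not_contains _ _ hc, List.map_append]
      have hvrep : v = List.replicate total 0 := by
        rw [hv]; exact PySem.Dict.getD_of_not_contains dic _ hc
      have hfr2 : pvFresh (t :: ts) dic =
          t :: (PySem.Set.ofList ts).filter (fun x => !(dic.contains x) && !(x == t)) := by
        unfold pvFresh
        rw [pv_ofList_cons, List.filter_cons, List.filter_filter]
        simp [hc]
      rw [hfr2, hfr _ hc]
      simp only [List.map_cons, List.map_nil]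
      rw [List.append_assoc, List.singleton_append]
      have hnt : t ∉ dic.keys := by
        intro hmem
        rw [← PySem.Dict.contains_iff_mem_keys] at hmem
        simp [hc] at hmem
      congr 1
      · apply List.map_congr_left
        intro p hp
        have hpt : p.1 ≠ t := by
          intro e
          exact hnt (e ▸ PySem.Dict.mem_keys_of_mem_items _ hp)
        simp [pvF, Ne.symm hpt]
      · congr 1
        · simp only [pvF, pvNew, hvrep]
          rw [pv_set_set_getD, pv_getD_replicate, Prod.mk.injEq]
          refine ⟨rfl, ?_⟩
          congr 1
          rw [List.count_cons_self]
          push_cast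
          ring
        · apply List.map_congr_left
          intro x hx
          have hxt : x ≠ t := by
            have := List.of_mem_filter hx
            simp at this
            exact this.2
          simp [pvNew, Ne.symm hxt]

-- characterisation of B's assemble fold, for any list of key/count pairs with distinct keys
def pvLk (L : List (String × Int)) (x : String) : Option Int :=
  (L.find? (fun q => q.1 == x)).map Prod.snd

theorem pvB_items (total i : Nat) (L : List (String × Int)) (dic : PvD)
    (hL : (L.map Prod.fst).Nodup) (hd : dic.keys.Nodup) :
    (L.foldl (pvAssignB total i) dic).items =
      dic.items.map (fun p => match pvLk L p.1 with
        | some c => (p.1, p.2.set i c)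
        | none => p)
      ++ (L.filter (fun q => !(dic.contains q.1))).map
          (fun q => (q.1, (List.replicate total (0 : Int)).set i q.2)) := by
  induction L generalizing dic with
  | nil =>
    simp only [List.foldl_nil, List.filter_nil, List.map_nil, List.append_nil]
    have h1 : ∀ p ∈ dic.items,
        (match pvLk [] p.1 with
          | some c => (p.1, p.2.set i c)
          | none => p) = id p := by
      intro p _; rfl
    rw [List.map_congr_left h1, List.map_id]
  | cons q L ih =>
    obtain ⟨k, c⟩ := q
    have hkL : k ∉ L.map Prod.fst := by
      simp only [List.map_cons, List.nodup_cons] at hL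
      exact hL.1
    have hLk_none : pvLk L k = none := by
      unfold pvLk
      rw [List.find?_eq_none.mpr]
      · rfl
      · intro q hq
        have hqk : q.1 ≠ k := fun e => hkL (e ▸ List.mem_map_of_mem hq)
        simp [hqk]
    rw [List.foldl_cons, pvAssignB_eq]
    have hL' : (L.map Prod.fst).Nodup := by
      simp only [List.map_cons, List.nodup_cons] at hL
      exact hL.2
    rw [ih _ hL' (PySem.Dict.nodup_keys_insert _ _ _ hd)]
    cases hck : dic.contains k with
    | true =>
      rw [PySem.Dict.items_insert_of_contains _ _ hck, List.map_map]
      congr 1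
      · apply List.map_congr_left
        intro p hp
        simp only [Function.comp_apply]
        by_cases hpk : p.1 = k
        · rw [if_pos (by simp [hpk])]
          have hmem : (p.1, p.2) ∈ dic.items := by simpa using hp
          have hv2 : dic.getD k (List.replicate total 0) = p.2 :=
            PySem.Dict.getD_of_mem_items dic (hpk ▸ hmem) hd _
          rw [hv2]
          have h2 : pvLk ((k, c) :: L) k = some c := by
            unfold pvLk
            simp [List.find?]
          simp only [hpk, h2, hLk_none]
        · rw [if_neg (by simp [hpk])]
          have h2 : pvLk ((k, c) :: L) p.1 = pvLk L p.1 := by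
            unfold pvLk
            simp [List.find?, beq_false_of_ne (Ne.symm hpk)]
          rw [h2]
      · have hfil : L.filter (fun q => !((dic.insert k ((dic.getD k (List.replicate total 0)).set i c)).contains q.1)) =
            L.filter (fun q => !(dic.contains q.1)) := by
          apply List.filter_congr
          intro q hq
          have hqk : q.1 ≠ k := by
            intro e
            exact hkL (e ▸ List.mem_map_of_mem hq)
          rw [PySem.Dict.contains_insert]
          simp [beq_false_of_ne hqk]
        rw [hfil, List.filter_cons]
        simp [hck]
    | false =>
      rw [PySem.Dict.items_insert_of_not_contains _ _ hck,
        PySem.Dict.getD_of_not_contains dic _ hck, List.map_append]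
      simp only [List.map_cons, List.map_nil]
      rw [List.append_assoc, List.singleton_append]
      have hnk : k ∉ dic.keys := by
        intro hmem
        rw [← PySem.Dict.contains_iff_mem_keys] at hmem
        simp [hck] at hmem
      congr 1
      · apply List.map_congr_left
        intro p hp
        have hpk : p.1 ≠ k := by
          intro e
          exact hnk (e ▸ PySem.Dict.mem_keys_of_mem_items _ hp)
        have h2 : pvLk ((k, c) :: L) p.1 = pvLk L p.1 := by
          unfold pvLk
          simp [List.find?, beq_false_of_ne (Ne.symm hpk)]
        rw [h2]
      · rw [List.filter_cons]
        simp only [hck, Bool.not_false, if_pos]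
        rw [List.map_cons]
        congr 1
        · rw [show pvLk L k = none from hLk_none]
        · congr 1
          apply List.filter_congr
          intro q hq
          have hqk : q.1 ≠ k := by
            intro e
            exact hkL (e ▸ List.mem_map_of_mem hq)
          rw [PySem.Dict.contains_insert]
          simp [beq_false_of_ne hqk]

-- per-document equality (A's incremental pass = B's tally-then-assemble pass)
theorem pvDoc_eq (total i : Nat) (ts : List String) (dic : PvD) (hd : dic.keys.Nodup)
    (hyp : ∀ p ∈ dic.items, p.2.getD i 0 = 0) :
    ts.foldl (pvStepA total i) dic =
      (PySem.Dict.counter ts : PySem.Dict String Int).items.foldl (pvAssignB total i) dic := by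
  have hfind : ∀ (l : List String) (x : String),
      l.find? (fun k => k == x) = if x ∈ l then some x else none := by
    intro l x
    induction l with
    | nil => simp
    | cons a l ihl =>
      rw [List.find?_cons]
      cases hax : a == x with
      | true =>
        have := eq_of_beq hax
        subst this
        simp
      | false =>
        have hax' : a ≠ x := ne_of_beq_false hax
        simp only [List.mem_cons]
        rw [ihl]
        by_cases hx : x ∈ l <;> simp [hx, Ne.symm hax']
  have hLk : ∀ x, pvLk (PySem.Dict.counter ts : PySem.Dict String Int).items x =
      if x ∈ ts then some ((List.count x ts : Int)) else none := by
    intro x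
    unfold pvLk
    rw [PySem.Dict.items_counter, List.find?_map]
    have : (fun (q : String × Int) => q.1 == x) ∘ (fun k => (k, (List.count k ts : Int))) =
        fun k => k == x := rfl
    rw [this, hfind]
    by_cases hx : x ∈ ts
    · simp [hx, PySem.Set.mem_ofList]
    · simp [hx, PySem.Set.mem_ofList]
  have hL : ((PySem.Dict.counter ts : PySem.Dict String Int).items.map Prod.fst).Nodup := by
    have := PySem.Dict.nodup_keys_counter (κ := String) ts
    simpa [PySem.Dict.keys] using this
  apply PySem.Dict.ext
  rw [pvA_items total i ts dic hd, pvB_items total i _ dic hL hd]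
  congr 1
  · apply List.map_congr_left
    intro p hp
    rw [hLk p.1]
    by_cases hx : p.1 ∈ ts
    · simp only [hx, if_pos]
      simp only [pvF, hyp p hp, zero_add]
    · rw [if_neg hx]
      simp only [pvF, List.count_eq_zero.mpr hx, Nat.cast_zero, add_zero]
      show (p.1, p.2.set i (p.2.getD i 0)) = p
      rw [pv_set_getD_self]
  · rw [PySem.Dict.items_counter, List.filter_map, List.map_map]
    rfl

-- invariant preservation across a document
theorem pvDoc_nodup (total i : Nat) (ts : List String) (dic : PvD) (hd : dic.keys.Nodup) :
    (ts.foldl (pvStepA total i) dic).keys.Nodup := by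
  have h := pvA_items total i ts dic hd
  have hkeys : (ts.foldl (pvStepA total i) dic).keys = dic.keys ++ pvFresh ts dic := by
    simp only [PySem.Dict.keys]
    rw [h, List.map_append, List.map_map, List.map_map]
    congr 1
    exact List.map_id _
  rw [hkeys, List.nodup_append]
  refine ⟨hd, (PySem.Set.nodup_ofList ts).filter _, ?_⟩
  intro x hx y hy e
  subst e
  have hcx : dic.contains x = false := by simpa using List.of_mem_filter hy
  rw [← PySem.Dict.contains_iff_mem_keys, hcx] at hx
  exact Bool.false_ne_true hx

theorem pvDoc_hyp (total i : Nat) (ts : List String) (dic : PvD) (hd : dic.keys.Nodup)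
    (hyp : ∀ p ∈ dic.items, ∀ j, i ≤ j → p.2.getD j 0 = 0) :
    ∀ p ∈ (ts.foldl (pvStepA total i) dic).items, ∀ j, i + 1 ≤ j → p.2.getD j 0 = 0 := by
  intro p hp j hj
  rw [pvA_items total i ts dic hd, List.mem_append] at hp
  have hji : j ≠ i := by omega
  rcases hp with hp | hp
  · obtain ⟨q, hq, rfl⟩ := List.mem_map.mp hp
    simp only [pvF]
    rw [pv_getD_set_ne _ _ _ _ hji]
    exact hyp q hq j (by omega)
  · obtain ⟨t, _, rfl⟩ := List.mem_map.mp hp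
    simp only [pvNew]
    rw [pv_getD_set_ne _ _ _ _ hji, pv_getD_replicate]

-- the outer loop: A's (dic, count) threading = B's enumerate fold
theorem pvOuter (total : Nat) (docs : List (List (List String))) :
    ∀ (i : Nat) (dic : PvD), dic.keys.Nodup →
      (∀ p ∈ dic.items, ∀ j, i ≤ j → p.2.getD j 0 = 0) →
      (docs.foldl (pvDocA total) (dic, i)).1 =
        (PySem.List.enumerate docs (i : Int)).foldl (pvDocB total) dic := by
  induction docs with
  | nil =>
    intro i dic _ _
    simp [PySem.List.enumerate]
  | cons d ds ih =>
    intro i dic hd hyp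
    rw [List.foldl_cons, PySem.List.enumerate_cons, List.foldl_cons]
    have hstep : (pvDocA total (dic, i) d).1 = pvDocB total dic ((i : Int), d) := by
      unfold pvDocA pvDocB pvCounts
      simp only [Int.toNat_natCast]
      rw [← List.foldl_flatten, ← List.foldl_flatten,
        PySem.Dict.foldl_insert_getD_add_one_eq_counter]
      exact pvDoc_eq total i d.flatten dic hd (fun p hp => hyp p hp i le_rfl)
    have hsnd : (pvDocA total (dic, i) d).2 = i + 1 := rfl
    have hdic1 := pvDoc_nodup total i d.flatten dic hd
    have hhyp1 := pvDoc_hyp total i d.flatten dic hd hyp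
    have hA : ds.foldl (pvDocA total) (pvDocA total (dic, i) d) =
        ds.foldl (pvDocA total) ((pvDocA total (dic, i) d).1, i + 1) := by
      rw [← hsnd]
    rw [hA]
    have hflat : (pvDocA total (dic, i) d).1 = d.flatten.foldl (pvStepA total i) dic := by
      unfold pvDocA
      rw [← List.foldl_flatten]
    have := ih (i + 1) (pvDocA total (dic, i) d).1 (hflat ▸ hdic1) (hflat ▸ hhyp1)
    rw [this, hstep]
    norm_num

-- ===== VERDICT (by name: the statement is the Claim_ definition above) =====
theorem abstracts_occurence_spec : Claim_equal_abstracts_occurence := by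
  intro ats _
  unfold Spec_abstracts_occurence abstracts_occurence abstracts_occurence_alt
  have h := pvOuter ats.length ats 0 PySem.Dict.empty (by simp [PySem.Dict.keys_empty])
    (by intro p hp _ _; simp [PySem.Dict.empty] at hp)
  simp only [Nat.cast_zero] at h
  simp only []
  rw [h]
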